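-- pv_equiv track=rewrite | github.com/MemberJunction/MJ | scripts/pg_convert_seeddata.py | convert_bit_to_boolean
-- ===== SOURCE A (Python) =====
-- def split_values(s):
--     """Split a VALUES string by commas, respecting single-quoted strings."""
--     result = []
--     current = []
--     in_string = False
--     i = 0
--     while i < len(s):
--         ch = s[i]
--         if ch == "'" and not in_string:
--             in_string = True
--             current.append(ch)
--         elif ch == "'" and in_string:
--             if i + 1 < len(s) and s[i + 1] == "'":
--                 current.append("''")
--                 i += 1
--             else:
--                 in_string = False
--                 current.append(ch)
--         elif ch == ',' and not in_string:
--             result.append(''.join(current))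
--             current = []
--         else:
--             current.append(ch)
--         i += 1
--
--     if current:
--         result.append(''.join(current))
--
--     return result
--
-- def convert_bit_to_boolean(values_str, col_names, bool_columns):
--     """Convert BIT 0/1 values to FALSE/TRUE for boolean columns."""
--     if not bool_columns:
--         return values_str
--
--     bool_indices = set()
--     for i, name in enumerate(col_names):
--         if name in bool_columns:
--             bool_indices.add(i)
--
--     if not bool_indices:
--         return values_str
--
--     values = split_values(values_str)
--
--     for idx in bool_indices:
--         if idx < len(values):
--             val = values[idx].strip()
--             if val == '0':
--                 values[idx] = 'FALSE'
--             elif val == '1':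
--                 values[idx] = 'TRUE'
--
--     return ', '.join(values)
-- ===== SOURCE B (Python) =====
-- def _split_rec(s):
--     """Split by unquoted commas, recursively: peel off the first segment."""
--     if not s:
--         return []
--     i = 0
--     in_q = False
--     while i < len(s):
--         c = s[i]
--         if c == "'":
--             if in_q and i + 1 < len(s) and s[i + 1] == "'":
--                 i += 1
--             else:
--                 in_q = not in_q
--         elif c == ',' and not in_q:
--             return [s[:i]] + _split_rec(s[i + 1:])
--         i += 1
--     return [s]
--
-- def convert_bit_to_boolean(values_str, col_names, bool_columns):
--     """Convert BIT 0/1 values to FALSE/TRUE for boolean columns."""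
--     if not any(name in bool_columns for name in col_names):
--         return values_str
--     parts = _split_rec(values_str)
--     out = []
--     for i, v in enumerate(parts):
--         t = v.strip()
--         if i < len(col_names) and col_names[i] in bool_columns and t in ('0', '1'):
--             out.append('TRUE' if t == '1' else 'FALSE')
--         else:
--             out.append(v)
--     return ', '.join(out)
-- ===== Notes on version B (the rewrite author's own statement) =====
-- stated objective: simpler
-- what changed: A precomputes a set of boolean column indices and mutates the split value list in place per index; B peels segments off recursively and builds the output in one fused enumerate pass, with a single any() guard replacing the index-set construction.
import Mathlib
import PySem

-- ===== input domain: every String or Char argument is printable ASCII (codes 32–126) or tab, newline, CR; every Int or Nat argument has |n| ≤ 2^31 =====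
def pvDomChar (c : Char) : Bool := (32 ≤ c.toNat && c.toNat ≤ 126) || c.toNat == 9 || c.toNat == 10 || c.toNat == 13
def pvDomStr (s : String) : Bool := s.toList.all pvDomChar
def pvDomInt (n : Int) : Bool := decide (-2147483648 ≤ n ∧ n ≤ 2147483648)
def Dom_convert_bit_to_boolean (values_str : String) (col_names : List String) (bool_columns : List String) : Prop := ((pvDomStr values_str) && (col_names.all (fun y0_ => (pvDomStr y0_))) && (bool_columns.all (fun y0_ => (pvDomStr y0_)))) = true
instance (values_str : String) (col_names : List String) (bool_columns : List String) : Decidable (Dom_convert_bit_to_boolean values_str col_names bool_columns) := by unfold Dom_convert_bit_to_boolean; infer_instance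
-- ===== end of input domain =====

-- B replaces A's precomputed bool-index set plus index-driven in-place mutation loop by a
-- recursive first-segment splitter and one fused enumerate-map pass (objective: simpler).

-- ===== PORT A =====
-- the while-loop of split_values: state (result, current, in_string), index scan with lookahead
def svLoop : List Char → List String → List Char → Bool → List String
  | [], result, current, _ =>
      if current = [] then result else result ++ [String.mk current]
  | ch :: rest, result, current, in_string =>
      if ch = '\'' ∧ in_string = false then
        svLoop rest result (current ++ ['\'']) true
      else if ch = '\'' ∧ in_string = true then
        if rest.head? = some '\'' then svLoop rest.tail result (current ++ ['\'', '\'']) in_string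
        else svLoop rest result (current ++ ['\'']) false
      else if ch = ',' ∧ in_string = false then
        svLoop rest (result ++ [String.mk current]) [] in_string
      else
        svLoop rest result (current ++ [ch]) in_string
termination_by s _ _ _ => s.length
decreasing_by all_goals (simp [List.length_tail]; try omega)

def split_values (s : String) : List String := svLoop s.toList [] [] false

def convert_bit_to_boolean (values_str : String) (col_names : List String) (bool_columns : List String) : String :=
  if bool_columns = [] then values_str
  else
    let bool_indices : PySem.Set Int :=
      (PySem.List.enumerate col_names).foldl
        (fun st p => if p.2 ∈ bool_columns then st.add p.1 else st) PySem.Set.empty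
    if bool_indices = [] then values_str
    else
      let values := split_values values_str
      let values := bool_indices.foldl (fun vs idx =>
        if idx < (vs.length : Int) then
          let val := PySem.Str.strip (PySem.List.pyGetD vs idx "")
          if val = "0" then PySem.List.pySetD vs idx "FALSE"
          else if val = "1" then PySem.List.pySetD vs idx "TRUE"
          else vs
        else vs) values
      PySem.Str.join ", " values

-- ===== PORT B =====
-- the scan of _split_rec's while loop, returning (first segment, remainder after the comma);
-- none = no unquoted comma (the split point is returned as before/after lists instead of an index)
def findComma : List Char → Bool → Option (List Char × List Char)
  | [], _ => none
  | c :: rest, in_q =>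
      if c = '\'' then
        if in_q then
          if rest.head? = some '\'' then (findComma rest.tail in_q).map (fun p => (c :: '\'' :: p.1, p.2))
          else (findComma rest false).map (fun p => (c :: p.1, p.2))
        else (findComma rest true).map (fun p => (c :: p.1, p.2))
      else if c = ',' ∧ in_q = false then some ([], rest)
      else (findComma rest in_q).map (fun p => (c :: p.1, p.2))
termination_by s _ => s.length
decreasing_by all_goals (simp [List.length_tail]; try omega)

theorem findComma_snd_lt (s : List Char) (inq : Bool) : ∀ p, findComma s inq = some p → p.2.length < s.length := by
  fun_induction findComma s inq with
  | case1 => simp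
  | case5 c rest inq h1 h2 => intro p h; cases h; simp
  | _ =>
      intro p h
      rename_i ih
      simp only [Option.map_eq_some_iff] at h
      obtain ⟨q, hq, rfl⟩ := h
      have := ih q hq
      simp only [List.length_cons, List.length_tail] at *
      omega

def split_rec (s : List Char) : List String :=
  match h : findComma s false with
  | some p => String.mk p.1 :: split_rec p.2
  | none => if s = [] then [] else [String.mk s]
termination_by s.length
decreasing_by exact findComma_snd_lt s false _ h

def convert_bit_to_boolean_alt (values_str : String) (col_names : List String) (bool_columns : List String) : String :=
  if ¬ col_names.any (fun n => decide (n ∈ bool_columns)) then values_str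
  else
    let parts := split_rec values_str.toList
    let out := (PySem.List.enumerate parts).map (fun p =>
      let t := PySem.Str.strip p.2
      if p.1 < (col_names.length : Int) ∧ PySem.List.pyGetD col_names p.1 "" ∈ bool_columns ∧ (t = "0" ∨ t = "1")
      then (if t = "1" then "TRUE" else "FALSE") else p.2)
    PySem.Str.join ", " out

-- ===== PRECONDITION & SPEC =====
def Spec_convert_bit_to_boolean (values_str : String) (col_names : List String) (bool_columns : List String) (out : String) : Prop := out = convert_bit_to_boolean_alt values_str col_names bool_columns
instance (values_str : String) (col_names : List String) (bool_columns : List String) (out : String) : Decidable (Spec_convert_bit_to_boolean values_str col_names bool_columns out) := by unfold Spec_convert_bit_to_boolean; infer_instance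

-- ===== CLAIM (what is proved, stated in full; the proofs are below) =====
def Claim_equal_convert_bit_to_boolean : Prop := ∀ (values_str : String) (col_names : List String) (bool_columns : List String), Dom_convert_bit_to_boolean values_str col_names bool_columns → Spec_convert_bit_to_boolean values_str col_names bool_columns (convert_bit_to_boolean values_str col_names bool_columns)

-- ===== LEMMAS AND PROOFS =====

-- the suffix of segments produced by svLoop from state (s, inq, current)
def segTail (s : List Char) (inq : Bool) (current : List Char) : List String :=
  match findComma s inq with
  | some p => String.mk (current ++ p.1) :: split_rec p.2
  | none => if current ++ s = [] then [] else [String.mk (current ++ s)]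

theorem segTail_nil_false (s : List Char) : segTail s false [] = split_rec s := by
  rw [split_rec]; unfold segTail; cases h : findComma s false <;> simp [*]

theorem segTail_map (s s' : List Char) (inq inq' : Bool) (pre : List Char)
    (hfc : findComma s inq = (findComma s' inq').map fun p => (pre ++ p.1, p.2))
    (hs : s = pre ++ s') (current : List Char) :
    segTail s inq current = segTail s' inq' (current ++ pre) := by
  unfold segTail
  rw [hfc, hs]
  cases findComma s' inq' <;> simp

theorem svLoop_eq_segTail (s : List Char) (result : List String) (current : List Char) (inq : Bool) :
    svLoop s result current inq = result ++ segTail s inq current := by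
  fun_induction svLoop s result current inq with
  | case1 result inq => simp [segTail, findComma]
  | case2 result current inq hc => simp [segTail, findComma, hc]
  | case3 ch rest result current in_string h ih =>
      obtain ⟨rfl, rfl⟩ := h
      rw [ih, segTail_map ('\'' :: rest) rest false true ['\''] (by simp [findComma]) (by simp) current]
  | case4 ch rest result current in_string h2 h1 hh ih =>
      obtain ⟨rfl, rfl⟩ := h1
      obtain ⟨t, rfl⟩ : ∃ t, rest = '\'' :: t := by
        cases rest <;> simp_all
      rw [ih, segTail_map ('\'' :: '\'' :: t) t true true ['\'', '\''] (by simp [findComma]) (by simp) current]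
      simp
  | case5 ch rest result current in_string h2 h1 hh ih =>
      obtain ⟨rfl, rfl⟩ := h1
      rw [ih, segTail_map ('\'' :: rest) rest true false ['\''] (by simp [findComma, hh]) (by simp) current]
  | case6 ch rest result current in_string h2 h1 h ih =>
      obtain ⟨rfl, rfl⟩ := h
      have hne : (',' : Char) ≠ '\'' := by decide
      rw [ih, segTail_nil_false]
      have : segTail (',' :: rest) false current = String.mk current :: split_rec rest := by
        unfold segTail
        have : findComma (',' :: rest) false = some ([], rest) := by simp [findComma]
        rw [this]
        simp
      rw [this]
      simp
  | case7 ch rest result current in_string h2 h1 h ih =>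
      have hch : ch ≠ '\'' := by
        rintro rfl
        cases in_string <;> simp_all
      rw [ih, segTail_map (ch :: rest) rest in_string in_string [ch] (by simp [findComma, hch, h]) (by simp) current]

theorem split_values_eq (s : String) : split_values s = split_rec s.toList := by
  simp [split_values, svLoop_eq_segTail, segTail_nil_false]

-- characterisations of A's index set and update fold
theorem biFold_eq (bc : List String) : ∀ (l : List (Int × String)) (st : List Int),
    (∀ p ∈ l, p.1 ∉ st) → (l.map (·.1)).Nodup →
    l.foldl (fun st p => if p.2 ∈ bc then PySem.Set.add st p.1 else st) st
      = st ++ (l.filter (fun p => decide (p.2 ∈ bc))).map (·.1) := by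
  intro l
  induction l with
  | nil => simp
  | cons p l ih =>
      intro st hst hnd
      simp only [List.foldl_cons, List.filter_cons, List.map_cons, List.nodup_cons] at *
      by_cases hp : p.2 ∈ bc
      · have hadd : PySem.Set.add st p.1 = st ++ [p.1] :=
          PySem.Set.add_of_not_mem (hst p (List.mem_cons_self ..))
        rw [if_pos hp, hadd, ih (st ++ [p.1]) ?_ hnd.2]
        · simp [hp]
        · intro q hq
          simp only [List.mem_append, List.mem_singleton, not_or]
          refine ⟨hst q (List.mem_cons_of_mem _ hq), ?_⟩
          intro h
          exact hnd.1 (h ▸ (List.mem_map_of_mem hq))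
      · rw [if_neg hp, ih st (fun q hq => hst q (List.mem_cons_of_mem _ hq)) hnd.2]
        simp [hp]

def idxList (col_names bool_columns : List String) : List Int :=
  ((PySem.List.enumerate col_names).filter (fun p => decide (p.2 ∈ bool_columns))).map (·.1)

theorem bool_indices_eq (col_names bool_columns : List String) :
    (PySem.List.enumerate col_names).foldl
      (fun st p => if p.2 ∈ bool_columns then PySem.Set.add st p.1 else st) PySem.Set.empty
      = idxList col_names bool_columns := by
  rw [biFold_eq bool_columns _ PySem.Set.empty (by simp [PySem.Set.empty])
    (by rw [PySem.List.map_fst_enumerate]; exact PySem.List.nodup_pyRange_one _ _)]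
  simp [idxList, PySem.Set.empty]

theorem mem_idxList (col_names bool_columns : List String) (i : Int) :
    i ∈ idxList col_names bool_columns ↔
      ∃ k : Nat, ∃ h : k < col_names.length, i = (k : Int) ∧ col_names[k] ∈ bool_columns := by
  simp only [idxList, List.mem_map, List.mem_filter, PySem.List.mem_enumerate_iff]
  constructor
  · rintro ⟨p, ⟨⟨k, hk, rfl⟩, hmem⟩, rfl⟩
    exact ⟨k, hk, by simp, by simpa using hmem⟩
  · rintro ⟨k, hk, rfl, hmem⟩
    exact ⟨((k : Int), col_names[k]), ⟨⟨k, hk, by simp⟩, by simpa using hmem⟩, rfl⟩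

theorem idxList_nil_iff (col_names bool_columns : List String) :
    idxList col_names bool_columns = [] ↔
      col_names.any (fun n => decide (n ∈ bool_columns)) = false := by
  simp only [idxList, List.map_eq_nil_iff, List.filter_eq_nil_iff, List.any_eq_false,
    PySem.List.mem_enumerate_iff]
  constructor
  · intro h n hn
    obtain ⟨k, hk, rfl⟩ := List.mem_iff_getElem.mp hn
    simpa using h ((k : Int), col_names[k]) ⟨k, hk, by simp⟩
  · rintro h p ⟨k, hk, rfl⟩
    simpa using h col_names[k] (List.getElem_mem hk)

theorem idxList_nodup (col_names bool_columns : List String) :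
    (idxList col_names bool_columns).Nodup := by
  have h1 : ((PySem.List.enumerate col_names).filter
      (fun p => decide (p.2 ∈ bool_columns))).Pairwise (fun p q => p.1 < q.1) :=
    (PySem.List.pairwise_lt_enumerate _ _).filter _
  have h2 := h1.map (f := fun p : Int × String => p.1) (S := (· < ·)) (fun a b h => h)
  exact (h2.imp ne_of_lt)

def convS (v : String) : String :=
  let t := PySem.Str.strip v
  if t = "0" then "FALSE" else if t = "1" then "TRUE" else v

def updStep (vs : List String) (idx : Int) : List String :=
  if idx < (vs.length : Int) then
    let val := PySem.Str.strip (PySem.List.pyGetD vs idx "")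
    if val = "0" then PySem.List.pySetD vs idx "FALSE"
    else if val = "1" then PySem.List.pySetD vs idx "TRUE"
    else vs
  else vs

theorem updStep_length (vs : List String) (idx : Int) : (updStep vs idx).length = vs.length := by
  simp only [updStep]
  split_ifs <;> simp [PySem.List.length_pySetD]

theorem updStep_getD (vs : List String) (k : Nat) (j : Nat) (hj : j < vs.length) :
    (updStep vs (k : Int)).getD j "" = if j = k then convS (vs.getD j "") else vs.getD j "" := by
  simp only [updStep, convS]
  by_cases hk : k < vs.length
  · rw [if_pos (by exact_mod_cast hk)]
    have hget : PySem.List.pyGetD vs (k : Int) "" = vs.getD k "" := by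
      simp [PySem.List.pyGetD_natCast, List.getD_eq_getElem?_getD, hk]
    rw [hget]
    by_cases hjk : j = k
    · subst hjk
      split_ifs <;>
        simp_all [PySem.List.pySetD_natCast, List.getD_eq_getElem?_getD]
    · split_ifs <;>
        simp_all [PySem.List.pySetD_natCast, List.getD_eq_getElem?_getD, Ne.symm hjk]
  · rw [if_neg (by exact_mod_cast hk)]
    have hjk : j ≠ k := by omega
    simp [hjk]

theorem updFold_length (S : List Int) : ∀ vs, (S.foldl updStep vs).length = vs.length := by
  induction S with
  | nil => simp
  | cons i S ih => intro vs; simp [ih, updStep_length]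

theorem updFold_getD (S : List Int) (hS : S.Nodup) (hnn : ∀ i ∈ S, ∃ k : Nat, i = (k : Int)) :
    ∀ (vs : List String) (j : Nat), j < vs.length →
      (S.foldl updStep vs).getD j "" =
        if (j : Int) ∈ S then convS (vs.getD j "") else vs.getD j "" := by
  induction S with
  | nil => simp
  | cons i S ih =>
      intro vs j hj
      obtain ⟨k, rfl⟩ := hnn i (List.mem_cons_self ..)
      simp only [List.foldl_cons]
      rw [ih hS.of_cons (fun q hq => hnn q (List.mem_cons_of_mem _ hq)) (updStep vs (k : Int)) j
        (by rw [updStep_length]; exact hj), updStep_getD vs k j hj]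
      by_cases hjk : j = k
      · subst hjk
        have hnotS : ((j : Int)) ∉ S := (List.nodup_cons.mp hS).1
        simp [hnotS]
      · have hne : ((j : Int)) ≠ (k : Int) := by exact_mod_cast hjk
        simp [hjk, List.mem_cons, hne]

theorem conv_eq_alt (col_names bc : List String) (j : Nat) (v : String) :
    (if (j : Int) ∈ idxList col_names bc then convS v else v) =
    (if (j : Int) < (col_names.length : Int) ∧ PySem.List.pyGetD col_names (j : Int) "" ∈ bc ∧
        (PySem.Str.strip v = "0" ∨ PySem.Str.strip v = "1")
     then (if PySem.Str.strip v = "1" then "TRUE" else "FALSE") else v) := by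
  have hmem : ((j : Int) ∈ idxList col_names bc) ↔
      (j < col_names.length ∧ col_names.getD j "" ∈ bc) := by
    rw [mem_idxList]
    constructor
    · rintro ⟨k, hk, hkj, hbc⟩
      have : j = k := by exact_mod_cast hkj
      subst this
      exact ⟨hk, by rwa [List.getD_eq_getElem?_getD, List.getElem?_eq_getElem hk]⟩
    · rintro ⟨hj, hbc⟩
      exact ⟨j, hj, rfl, by rwa [List.getD_eq_getElem?_getD, List.getElem?_eq_getElem hj] at hbc⟩
  by_cases hj : j < col_names.length
  · have hget : PySem.List.pyGetD col_names (j : Int) "" = col_names.getD j "" := by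
      simp [PySem.List.pyGetD_natCast, List.getD_eq_getElem?_getD, hj]
    rw [hget]
    by_cases hbc : col_names.getD j "" ∈ bc
    · rw [if_pos (hmem.mpr ⟨hj, hbc⟩)]
      simp only [convS]
      split_ifs <;> simp_all
    · rw [if_neg (fun h => hbc (hmem.mp h).2)]
      rw [if_neg (by rintro ⟨-, h, -⟩; exact hbc h)]
  · rw [if_neg (fun h => hj (hmem.mp h).1), if_neg (by rintro ⟨h, -⟩; exact hj (by exact_mod_cast h))]

-- ===== VERDICT (by name: the statement is the Claim_ definition above) =====
theorem convert_bit_to_boolean_spec : Claim_equal_convert_bit_to_boolean := by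
  intro values_str col_names bool_columns _
  unfold Spec_convert_bit_to_boolean
  simp only [convert_bit_to_boolean, convert_bit_to_boolean_alt, bool_indices_eq]
  by_cases hany : col_names.any (fun n => decide (n ∈ bool_columns)) = false
  · have hS : idxList col_names bool_columns = [] := (idxList_nil_iff ..).mpr hany
    simp [hS, hany]
  · have hS : idxList col_names bool_columns ≠ [] :=
      fun h => hany ((idxList_nil_iff ..).mp h)
    have hbcne : bool_columns ≠ [] := by
      rcases List.any_eq_true.mp (Bool.of_not_eq_false hany) with ⟨n, -, hn⟩
      rintro rfl
      simp at hn
    rw [if_neg hbcne, if_neg hS, if_neg (by simp [Bool.of_not_eq_false hany])]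
    rw [split_values_eq]
    congr 1
    set V := split_rec values_str.toList with hV
    set S := idxList col_names bool_columns with hSdef
    have hfold : S.foldl (fun vs idx =>
        if idx < (vs.length : Int) then
          let val := PySem.Str.strip (PySem.List.pyGetD vs idx "")
          if val = "0" then PySem.List.pySetD vs idx "FALSE"
          else if val = "1" then PySem.List.pySetD vs idx "TRUE"
          else vs
        else vs) V = S.foldl updStep V := rfl
    rw [hfold]
    have hnn : ∀ i ∈ S, ∃ k : Nat, i = (k : Int) := by
      intro i hi
      obtain ⟨k, -, rfl, -⟩ := (mem_idxList ..).mp hi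
      exact ⟨k, rfl⟩
    apply List.ext_getElem
    · simp [updFold_length, PySem.List.length_enumerate]
    · intro j h1 h2
      have hjV : j < V.length := by rwa [updFold_length] at h1
      have hL : (S.foldl updStep V)[j] = (S.foldl updStep V).getD j "" := by
        rw [List.getD_eq_getElem?_getD, List.getElem?_eq_getElem h1]
        rfl
      rw [hL, updFold_getD S (idxList_nodup ..) hnn V j hjV]
      rw [List.getElem_map, PySem.List.getElem_enumerate]
      have hVg : V.getD j "" = V[j] := by
        rw [List.getD_eq_getElem?_getD, List.getElem?_eq_getElem hjV]
        rfl
      rw [hVg]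
      simpa using conv_eq_alt col_names bool_columns j V[j]
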